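-- pv_equiv track=rewrite | github.com/sathishkumar67/PODFCSSV | main.py | build_dataset_order_by_stage
-- ===== SOURCE A (Python) =====
-- from typing import Any, Dict, List, Optional, Sequence, Tuple
--
-- BENCHMARK_CLIENT_DATASET_SEQUENCE: Dict[int, List[str]] = {
--     0: ["eurosat", "food101", "oxfordiiitpet"],
--     1: ["gtsrb", "country211", "fgvcaircraft"],
-- }
--
-- def normalize_client_dataset_sequence(
--     dataset_sequence: Dict[Any, Sequence[str]],
-- ) -> Dict[int, List[str]]:
--     """Convert client keys to integers and dataset sequences to plain lists."""
--     return {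
--         int(client_index): list(dataset_names)
--         for client_index, dataset_names in dataset_sequence.items()
--     }
--
-- def build_dataset_order_by_stage(
--     dataset_sequence: Optional[Dict[Any, Sequence[str]]] = None,
-- ) -> List[str]:
--     """Flatten one client schedule into the stage order used by evaluation."""
--     sequence = dataset_sequence or BENCHMARK_CLIENT_DATASET_SEQUENCE
--     normalized_sequence = normalize_client_dataset_sequence(sequence)
--     stage_count = len(next(iter(normalized_sequence.values())))
--
--     dataset_order: List[str] = []
--     for stage_index in range(stage_count):
--         for client_index in sorted(normalized_sequence):
--             dataset_order.append(normalized_sequence[client_index][stage_index])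
--     return dataset_order
-- ===== SOURCE B (Python) =====
-- from typing import Any, Dict, List, Optional, Sequence
--
-- BENCHMARK_CLIENT_DATASET_SEQUENCE: Dict[int, List[str]] = {
--     0: ["eurosat", "food101", "oxfordiiitpet"],
--     1: ["gtsrb", "country211", "fgvcaircraft"],
-- }
--
-- def build_dataset_order_by_stage(
--     dataset_sequence: Optional[Dict[Any, Sequence[str]]] = None,
-- ) -> List[str]:
--     """Single client-major pass: append each client's stage-s dataset to bucket s, then concatenate the buckets."""
--     sequence = dataset_sequence or BENCHMARK_CLIENT_DATASET_SEQUENCE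
--     normalized = {int(k): list(v) for k, v in sequence.items()}
--     stage_count = len(next(iter(normalized.values())))
--     buckets: List[List[str]] = [[] for _ in range(stage_count)]
--     for key in sorted(normalized):
--         row = normalized[key]
--         for stage in range(stage_count):
--             buckets[stage].append(row[stage])
--     order: List[str] = []
--     for bucket in buckets:
--         order.extend(bucket)
--     return order
-- ===== Notes on version B (the rewrite author's own statement) =====
-- stated objective: alternative
-- what changed: A iterates stage-major, re-sorting the client keys and doing a dict lookup for every (stage, client) element; B makes a single client-major pass that appends each client's stage-s dataset into a per-stage bucket list and concatenates the buckets, so the keys are sorted once and each row is fetched once.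
import Mathlib
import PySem

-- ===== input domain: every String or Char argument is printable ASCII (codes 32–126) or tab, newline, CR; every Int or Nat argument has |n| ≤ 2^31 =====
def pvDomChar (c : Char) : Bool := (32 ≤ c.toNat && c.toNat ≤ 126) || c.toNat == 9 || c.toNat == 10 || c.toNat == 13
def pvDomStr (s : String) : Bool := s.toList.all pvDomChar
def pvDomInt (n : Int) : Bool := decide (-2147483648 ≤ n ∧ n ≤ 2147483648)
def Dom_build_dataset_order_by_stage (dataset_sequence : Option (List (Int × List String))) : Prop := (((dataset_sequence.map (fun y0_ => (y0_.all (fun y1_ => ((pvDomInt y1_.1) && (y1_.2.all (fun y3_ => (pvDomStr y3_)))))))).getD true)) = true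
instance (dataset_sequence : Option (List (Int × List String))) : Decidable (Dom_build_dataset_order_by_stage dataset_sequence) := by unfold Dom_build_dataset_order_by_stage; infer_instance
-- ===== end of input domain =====

-- B replaces A's stage-major nested loops (re-sorted key scan + dict lookup per element) by one
-- client-major pass that appends into per-stage bucket lists and concatenates them (alternative).

-- ===== PORT A =====
def pvBenchmarkClientDatasetSequence : List (Int × List String) :=
  [(0, ["eurosat", "food101", "oxfordiiitpet"]), (1, ["gtsrb", "country211", "fgvcaircraft"])]

-- dict comprehension {int(k): list(v) …}; int(k) is the identity on the Int keys of this type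
def normalize_client_dataset_sequence (dataset_sequence : List (Int × List String)) : PySem.Dict Int (List String) :=
  dataset_sequence.foldl (fun d p => d.insert p.1 p.2) PySem.Dict.empty

def build_dataset_order_by_stage (dataset_sequence : Option (List (Int × List String))) : List String :=
  -- `dataset_sequence or BENCHMARK…`: None and the empty dict both fall back to the default
  let sequence := match dataset_sequence with
    | none => pvBenchmarkClientDatasetSequence
    | some l => if l.isEmpty then pvBenchmarkClientDatasetSequence else l
  let normalized := normalize_client_dataset_sequence sequence
  -- len(next(iter(values))): the dict is nonempty here, so headD's default is never read
  let stage_count : Int := ((normalized.values.headD []).length : Int)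
  (PySem.List.pyRange 0 stage_count 1).foldl (fun acc stage =>
    (PySem.List.sorted normalized.keys (fun k => k) false).foldl (fun acc k =>
      -- normalized[k][stage]: k is always a key; an out-of-range stage is Python's IndexError (outside Pre_)
      acc ++ [PySem.List.pyGetD (normalized.getD k []) stage ""]) acc) []

-- ===== PORT B =====
def build_dataset_order_by_stage_alt (dataset_sequence : Option (List (Int × List String))) : List String :=
  let sequence := match dataset_sequence with
    | none => pvBenchmarkClientDatasetSequence
    | some l => if l.isEmpty then pvBenchmarkClientDatasetSequence else l
  let normalized := normalize_client_dataset_sequence sequence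
  let stage_count : Int := ((normalized.values.headD []).length : Int)
  -- buckets = [[] for _ in range(stage_count)]
  let buckets0 : List (List String) := (PySem.List.pyRange 0 stage_count 1).map (fun _ => [])
  -- one client-major pass: buckets[stage].append(row[stage]); stage ≥ 0, so .toNat is exact
  let buckets := (PySem.List.sorted normalized.keys (fun k => k) false).foldl
    (fun bks k =>
      let row := normalized.getD k []
      (PySem.List.pyRange 0 stage_count 1).foldl
        (fun bks stage =>
          bks.set stage.toNat
            (PySem.List.pyGetD bks stage [] ++ [PySem.List.pyGetD row stage ""])) bks) buckets0
  -- order = []; for bucket in buckets: order.extend(bucket)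
  buckets.foldl (fun acc b => acc ++ b) []

-- ===== PRECONDITION & SPEC =====
-- Pre_ excludes exactly the ragged schedules on which Python (A and B alike) raises IndexError:
-- after the dict normalisation, some client's list is shorter than the first client's (the stage count).
def Pre_build_dataset_order_by_stage (dataset_sequence : Option (List (Int × List String))) : Prop :=
  let sequence := match dataset_sequence with
    | none => pvBenchmarkClientDatasetSequence
    | some l => if l.isEmpty then pvBenchmarkClientDatasetSequence else l
  let normalized := normalize_client_dataset_sequence sequence
  ∀ v ∈ normalized.values, (normalized.values.headD []).length ≤ v.length
instance (dataset_sequence : Option (List (Int × List String))) : Decidable (Pre_build_dataset_order_by_stage dataset_sequence) := by unfold Pre_build_dataset_order_by_stage; infer_instance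

def pvWitness_build_dataset_order_by_stage : (Option (List (Int × List String))) :=
  some [(0, ["a"]), (1, ["b", "c"])]

def Spec_build_dataset_order_by_stage (dataset_sequence : Option (List (Int × List String))) (out : List String) : Prop := out = build_dataset_order_by_stage_alt dataset_sequence
instance (dataset_sequence : Option (List (Int × List String))) (out : List String) : Decidable (Spec_build_dataset_order_by_stage dataset_sequence out) := by unfold Spec_build_dataset_order_by_stage; infer_instance

-- ===== CLAIM (what is proved, stated in full; the proofs are below) =====
def Claim_equal_build_dataset_order_by_stage : Prop := ∀ (dataset_sequence : Option (List (Int × List String))), Dom_build_dataset_order_by_stage dataset_sequence → Pre_build_dataset_order_by_stage dataset_sequence → Spec_build_dataset_order_by_stage dataset_sequence (build_dataset_order_by_stage dataset_sequence)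

-- ===== LEMMAS AND PROOFS =====

-- A's inner loop appends one element per key: it is the map over the keys.
theorem pv_foldl_singleton {α γ : Type} (g : α → γ) :
    ∀ (K : List α) (acc : List γ), K.foldl (fun a k => a ++ [g k]) acc = acc ++ K.map g := by
  intro K
  induction K with
  | nil => intro acc; simp
  | cons k K ih => intro acc; simp [ih]

-- A's nested loops produce the flattened stage-major grid.
theorem pv_nested {α β γ : Type} (g : α → β → γ) (K : List β) :
    ∀ (R : List α) (acc : List γ),
      R.foldl (fun acc s => K.foldl (fun a k => a ++ [g s k]) acc) acc
        = acc ++ (R.map (fun s => K.map (g s))).flatten := by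
  intro R
  induction R with
  | nil => intro acc; simp
  | cons s R ih =>
    intro acc
    rw [List.foldl_cons, pv_foldl_singleton, ih]
    simp [List.append_assoc]

-- setting one cell of a tabulated list re-tabulates it
theorem pv_set_map_range {γ : Type} (g : Nat → γ) (n m : Nat) (v : γ) (_hm : m < n) :
    ((List.range n).map g).set m v
      = (List.range n).map (fun i => if i = m then v else g i) := by
  apply List.ext_getElem
  · simp
  · intro i h1 h2
    simp only [List.getElem_set, List.getElem_map, List.getElem_range]
    split_ifs with h h' h'
    · rfl
    · omega
    · omega
    · rfl

-- B's inner loop over the stages: appends w i to bucket i, for every i < n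
theorem pv_inner {γ : Type} (w : Nat → γ) (B0 : Nat → List γ) (n : Nat) :
    ∀ m, m ≤ n →
      (List.range m).foldl
        (fun bks i => bks.set i (PySem.List.pyGetD bks (i : Int) [] ++ [w i]))
        ((List.range n).map B0)
      = (List.range n).map (fun i => if i < m then B0 i ++ [w i] else B0 i) := by
  intro m
  induction m with
  | zero =>
    intro _
    simp
  | succ m ih =>
    intro hm
    rw [List.range_succ, List.foldl_append, ih (by omega), List.foldl_cons, List.foldl_nil,
      PySem.List.pyGetD_natCast, PySem.List.getD_map_range _ _ _ _ (by omega)]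
    have hmm : ¬ m < m := by omega
    rw [if_neg hmm, pv_set_map_range _ _ _ _ (by omega)]
    apply List.map_congr_left
    intro i _
    by_cases h : i = m
    · simp [h]
    · by_cases h' : i < m <;> simp [h, h'] <;> omega

-- B's outer client-major pass on the per-stage buckets of the already-processed keys R
theorem pv_outer {β γ : Type} (f : β → Nat → γ) (n : Nat) :
    ∀ (K R : List β),
      K.foldl
        (fun bks k =>
          (List.range n).foldl
            (fun bks i => bks.set i (PySem.List.pyGetD bks (i : Int) [] ++ [f k i])) bks)
        ((List.range n).map (fun i => R.map (fun k => f k i)))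
      = (List.range n).map (fun i => (R ++ K).map (fun k => f k i)) := by
  intro K
  induction K with
  | nil => intro R; simp
  | cons k K ih =>
    intro R
    rw [List.foldl_cons, pv_inner (fun i => f k i) (fun i => R.map (fun k => f k i)) n n le_rfl]
    have h1 : ((List.range n).map fun i =>
        if i < n then R.map (fun k => f k i) ++ [f k i] else R.map (fun k => f k i))
        = (List.range n).map (fun i => (R ++ [k]).map (fun k => f k i)) := by
      apply List.map_congr_left
      intro i hi
      rw [if_pos (List.mem_range.mp hi)]
      simp
    rw [h1, ih (R ++ [k])]
    simp

-- B verbatim: client-major bucket fold + concatenation = flattened stage-major grid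
theorem pv_B {γ : Type} (f : Int → Int → γ) (n : Nat) (K : List Int) :
    List.foldl (fun acc b => acc ++ b) []
      (K.foldl (fun bks k =>
          (((List.range n).map (fun i : Nat => (i : Int)))).foldl
            (fun bks stage => bks.set stage.toNat
              (PySem.List.pyGetD bks stage [] ++ [f k stage])) bks)
        ((((List.range n).map (fun i : Nat => (i : Int)))).map (fun _ => ([] : List γ))))
    = ((List.range n).map (fun s : Nat => K.map (fun k => f k (s : Int)))).flatten := by
  have h1 : ∀ (k : Int) (bks : List (List γ)),
      (((List.range n).map (fun i : Nat => (i : Int)))).foldl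
        (fun bks stage => bks.set stage.toNat
          (PySem.List.pyGetD bks stage [] ++ [f k stage])) bks
      = (List.range n).foldl
        (fun bks i => bks.set i (PySem.List.pyGetD bks (i : Int) [] ++ [f k (i : Int)])) bks := by
    intro k bks
    rw [List.foldl_map]
    simp only [Int.toNat_natCast]
  have h2 : (((List.range n).map (fun i : Nat => (i : Int)))).map (fun _ => ([] : List γ))
      = (List.range n).map (fun i : Nat => ([] : List Int).map (fun k => f k (i : Int))) := by
    rw [List.map_map]
    rfl
  simp only [h1, h2]
  rw [pv_outer (fun (k : Int) (i : Nat) => f k (i : Int)) n K []]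
  simp only [List.nil_append]
  rw [PySem.List.foldl_append_eq_flatMap (fun b => b)]
  simp [List.flatMap_def, Function.comp_def]

-- ===== VERDICT (by name: the statement is the Claim_ definition above) =====
theorem build_dataset_order_by_stage_spec : Claim_equal_build_dataset_order_by_stage := by
  intro ds _ _
  unfold Spec_build_dataset_order_by_stage
  unfold build_dataset_order_by_stage build_dataset_order_by_stage_alt
  dsimp only
  generalize (match ds with
    | none => pvBenchmarkClientDatasetSequence
    | some l => if l.isEmpty then pvBenchmarkClientDatasetSequence else l) = seq
  generalize normalize_client_dataset_sequence seq = nd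
  generalize PySem.List.sorted nd.keys (fun k => k) false = K
  generalize (nd.values.headD []).length = sc
  rw [PySem.List.pyRange_zero_natCast sc]
  rw [List.foldl_map,
    pv_nested (fun (s : Nat) (k : Int) => PySem.List.pyGetD (nd.getD k []) (s : Int) "") K (List.range sc) [],
    pv_B (fun (k : Int) (stage : Int) => PySem.List.pyGetD (nd.getD k []) stage "") sc K]
  simp
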